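-- pv_equiv track=rewrite | github.com/tomheon/archaeologit | archaeologit/git_log.py | _parse_log_msg
-- ===== SOURCE A (Python) =====
-- def _parse_log_msg(header_lines):
--     """
--     The log message begins with the first empty, and continues until
--     the first non-empty line beginning with something other than a
--     space character.
--
--     Returns the log message lines as a list.
--     """
--     log_msg_lines = []
--     for line in header_lines:
--         if not line:
--             log_msg_lines.append(line)
--         elif line.startswith((' ', '\t')) and log_msg_lines:
--             log_msg_lines.append(line)
--         elif log_msg_lines:
--             break
--     return log_msg_lines
-- ===== SOURCE B (Python) =====
-- def _parse_log_msg(header_lines):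
--     """Two-phase skip-then-take: skip the leading non-empty lines, then take the
--     message body (empty lines or lines starting with space/tab)."""
--     i = 0
--     while i < len(header_lines) and header_lines[i]:
--         i += 1
--     body = []
--     for line in header_lines[i:]:
--         if line and not line.startswith((' ', '\t')):
--             break
--         body.append(line)
--     return body
-- ===== Notes on version B (the rewrite author's own statement) =====
-- stated objective: idiomatic
-- what changed: Replaces the single stateful loop with a running emptiness flag by a two-phase skip-then-take decomposition: first drop all leading non-empty lines, then collect the message body until the first non-empty non-indented line.
import Mathlib
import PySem

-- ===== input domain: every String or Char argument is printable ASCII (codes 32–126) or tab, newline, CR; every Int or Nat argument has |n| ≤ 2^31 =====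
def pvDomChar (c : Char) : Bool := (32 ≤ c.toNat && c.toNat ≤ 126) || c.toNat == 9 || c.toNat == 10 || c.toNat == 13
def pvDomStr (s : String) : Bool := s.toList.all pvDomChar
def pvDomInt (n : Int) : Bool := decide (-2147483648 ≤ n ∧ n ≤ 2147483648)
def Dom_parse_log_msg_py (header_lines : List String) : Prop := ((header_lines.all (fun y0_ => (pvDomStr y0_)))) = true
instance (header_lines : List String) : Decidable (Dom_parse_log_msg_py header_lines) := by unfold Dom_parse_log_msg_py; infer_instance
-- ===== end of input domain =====

-- B replaces A's single stateful loop (running emptiness flag + break) by a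
-- two-phase skip-then-take decomposition; same O(n) cost, plainer structure.


-- ===== PORT A =====
-- A's for-loop with accumulator log_msg_lines and early break
def pvLoopA (acc : List String) : List String → List String
  | [] => acc
  | line :: rest =>
    if line = "" then pvLoopA (acc ++ [line]) rest
    else if (PySem.Str.startswith line " " || PySem.Str.startswith line "\t") && !acc.isEmpty then
      pvLoopA (acc ++ [line]) rest
    else if !acc.isEmpty then acc
    else pvLoopA acc rest

def parse_log_msg_py (header_lines : List String) : List String :=
  pvLoopA [] header_lines

-- ===== PORT B =====
-- Source B phase 1: the while loop counting leading non-empty lines (the index i)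
def pvSkipCount : List String → Nat
  | [] => 0
  | line :: rest => if line ≠ "" then pvSkipCount rest + 1 else 0

-- Source B phase 2: the for-loop over header_lines[i:] with break, building body
def pvTakeBody : List String → List String
  | [] => []
  | line :: rest =>
    if line ≠ "" && !(PySem.Str.startswith line " " || PySem.Str.startswith line "\t") then []
    else line :: pvTakeBody rest

def parse_log_msg_py_alt (header_lines : List String) : List String :=
  pvTakeBody (header_lines.drop (pvSkipCount header_lines))

-- ===== PRECONDITION & SPEC =====
def Spec_parse_log_msg_py (header_lines : List String) (out : List String) : Prop := out = parse_log_msg_py_alt header_lines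
instance (header_lines : List String) (out : List String) : Decidable (Spec_parse_log_msg_py header_lines out) := by unfold Spec_parse_log_msg_py; infer_instance

-- ===== CLAIM (what is proved, stated in full; the proofs are below) =====
def Claim_equal_parse_log_msg_py : Prop := ∀ (header_lines : List String), Dom_parse_log_msg_py header_lines → Spec_parse_log_msg_py header_lines (parse_log_msg_py header_lines)

-- ===== LEMMAS AND PROOFS =====

-- once the accumulator is non-empty, A appends exactly the body lines
theorem pvLoopA_nonempty (l : List String) :
    ∀ acc : List String, acc ≠ [] → pvLoopA acc l = acc ++ pvTakeBody l := by
  induction l with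
  | nil => intro acc _; simp [pvLoopA, pvTakeBody]
  | cons line rest ih =>
    intro acc hacc
    by_cases h : line = ""
    · subst h
      rw [pvLoopA, pvTakeBody]
      rw [ih (acc ++ [""]) (by simp)]
      simp
    · have hne : acc.isEmpty = false := by simpa [List.isEmpty_iff] using hacc
      by_cases hs : (PySem.Str.startswith line " " || PySem.Str.startswith line "\t") = true
      · rw [pvLoopA, pvTakeBody]
        simp only [if_neg h, hs, hne, decide_not]
        rw [ih (acc ++ [line]) (by simp)]
        simp [h]
      · rw [pvLoopA, pvTakeBody]
        simp only [PySem.Str.startswith_eq, Bool.or_eq_true, not_or, Bool.not_eq_true] at hs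
        rw [show (" ".toList) = [' '] from rfl, show ("\t".toList) = ['\t'] from rfl] at hs
        simp [h, hne, hs.1, hs.2]

theorem pvLoopA_empty (l : List String) :
    pvLoopA [] l = pvTakeBody (l.drop (pvSkipCount l)) := by
  induction l with
  | nil => simp [pvLoopA, pvSkipCount, pvTakeBody]
  | cons line rest ih =>
    by_cases h : line = ""
    · subst h
      have h1 := pvLoopA_nonempty rest [""] (by simp)
      rw [pvLoopA, pvSkipCount]
      simp [pvTakeBody, h1]
    · rw [pvLoopA, pvSkipCount]
      simp [h, ih]

-- ===== VERDICT (by name: the statement is the Claim_ definition above) =====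
theorem parse_log_msg_py_spec : Claim_equal_parse_log_msg_py := by
  intro hl _
  show parse_log_msg_py hl = parse_log_msg_py_alt hl
  simpa [parse_log_msg_py, parse_log_msg_py_alt] using pvLoopA_empty hl
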